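-- pv_equiv track=rewrite | github.com/justinmvail/glossy | font_scraper/docker/stroke_model/compare_runs.py | pick_epochs
-- ===== SOURCE A (Python) =====
-- def pick_epochs(available, targets):
--     """Pick the closest available epoch to each target."""
--     if not available:
--         return []
--     avail_sorted = sorted(available.keys())
--     picked = []
--     seen = set()
--     for t in targets:
--         closest = min(avail_sorted, key=lambda x: abs(x - t))
--         if closest not in seen and abs(closest - t) <= 5:
--             picked.append(closest)
--             seen.add(closest)
--     return picked
-- ===== SOURCE B (Python) =====
-- from bisect import bisect_left
--
-- def pick_epochs(available, targets):
--     """Pick the closest available epoch to each target (binary search per target)."""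
--     keys = sorted(available)
--     if not keys:
--         return []
--     picked = []
--     seen = set()
--     for t in targets:
--         i = bisect_left(keys, t)
--         if i == 0:
--             c = keys[0]
--         elif i == len(keys):
--             c = keys[-1]
--         else:
--             c = keys[i - 1] if t - keys[i - 1] <= keys[i] - t else keys[i]
--         if c not in seen and abs(c - t) <= 5:
--             picked.append(c)
--             seen.add(c)
--     return picked
-- ===== Notes on version B (the rewrite author's own statement) =====
-- stated objective: faster
-- what changed: per-target closest key is found by bisect_left binary search on the sorted keys (comparing the two neighbouring keys, tie to the smaller) instead of a linear min-by-abs scan over all keys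
import Mathlib
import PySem

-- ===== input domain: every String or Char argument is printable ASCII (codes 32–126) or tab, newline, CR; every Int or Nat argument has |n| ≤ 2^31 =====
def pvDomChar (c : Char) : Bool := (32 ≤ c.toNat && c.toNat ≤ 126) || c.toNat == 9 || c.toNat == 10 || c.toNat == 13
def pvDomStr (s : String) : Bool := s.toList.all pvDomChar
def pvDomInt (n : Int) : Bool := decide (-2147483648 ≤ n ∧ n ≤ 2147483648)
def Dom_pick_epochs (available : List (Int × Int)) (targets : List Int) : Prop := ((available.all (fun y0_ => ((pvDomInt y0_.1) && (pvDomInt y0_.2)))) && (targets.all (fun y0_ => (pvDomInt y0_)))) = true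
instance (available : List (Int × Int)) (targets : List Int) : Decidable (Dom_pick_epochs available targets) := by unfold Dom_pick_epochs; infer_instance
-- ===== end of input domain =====

-- B replaces A's per-target linear min-by-abs scan over all keys with a bisect_left binary
-- search on the sorted keys (comparing the two neighbouring keys, tie to the smaller): faster.

-- ===== PORT A =====
def pick_epochs (available : List (Int × Int)) (targets : List Int) : List Int :=
  if available = [] then []
  else
    let avail_sorted := PySem.List.sorted (PySem.List.dedup (available.map Prod.fst)) (fun x => x)
    (targets.foldl (fun (st : List Int × PySem.Set Int) t =>
        match PySem.List.min? avail_sorted (fun x => |x - t|) with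
        | none => st   -- unreachable (totality guard): avail_sorted is nonempty here
        | some closest =>
          if closest ∉ st.2 ∧ |closest - t| ≤ 5 then (st.1 ++ [closest], st.2.add closest)
          else st)
      ([], PySem.Set.empty)).1

-- ===== PORT B =====
def pick_epochs_alt (available : List (Int × Int)) (targets : List Int) : List Int :=
  let keys := PySem.List.sorted (PySem.List.dedup (available.map Prod.fst)) (fun x => x)
  if keys = [] then []
  else
    (targets.foldl (fun (st : List Int × PySem.Set Int) t =>
        let i := PySem.List.bisectLeft keys t
        let c :=
          if i = 0 then PySem.List.pyGetD keys 0 0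
          else if i = keys.length then PySem.List.pyGetD keys (-1) 0
          else if t - PySem.List.pyGetD keys ((i : Int) - 1) 0 ≤ PySem.List.pyGetD keys (i : Int) 0 - t
            then PySem.List.pyGetD keys ((i : Int) - 1) 0
            else PySem.List.pyGetD keys (i : Int) 0
        if c ∉ st.2 ∧ |c - t| ≤ 5 then (st.1 ++ [c], st.2.add c) else st)
      ([], PySem.Set.empty)).1

-- ===== PRECONDITION & SPEC =====
def Spec_pick_epochs (available : List (Int × Int)) (targets : List Int) (out : List Int) : Prop := out = pick_epochs_alt available targets
instance (available : List (Int × Int)) (targets : List Int) (out : List Int) : Decidable (Spec_pick_epochs available targets out) := by unfold Spec_pick_epochs; infer_instance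

-- ===== CLAIM (what is proved, stated in full; the proofs are below) =====
def Claim_equal_pick_epochs : Prop := ∀ (available : List (Int × Int)) (targets : List Int), Dom_pick_epochs available targets → Spec_pick_epochs available targets (pick_epochs available targets)

-- ===== LEMMAS AND PROOFS =====

-- One step of the running-minimum fold of Python's `min(xs, key=…)`.
lemma pick_min?_cons_cons (key : Int → Int) (a x : Int) (xs : List Int) :
    PySem.List.min? (a :: x :: xs) key =
      PySem.List.min? ((if key x < key a then x else a) :: xs) key := by
  by_cases h : key x < key a <;> simp [PySem.List.min?, h]

-- The result of Python's `min(a::xs, key=…)` is minimal in key, and among elements of equal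
-- key it keeps the earliest seen one (the smallest, when the list is strictly ascending).
lemma pick_min_aux (key : Int → Int) : ∀ (xs : List Int) (a : Int),
    (∀ y ∈ xs, a < y) → xs.Pairwise (· < ·) →
    ∃ m, PySem.List.min? (a :: xs) key = some m ∧
      (m = a ∨ m ∈ xs) ∧ (key m < key a ∨ m = a) ∧
      (∀ y ∈ xs, key m < key y ∨ (key m = key y ∧ m ≤ y)) := by
  intro xs
  induction xs with
  | nil =>
    intro a _ _
    exact ⟨a, by simp [PySem.List.min?], Or.inl rfl, Or.inr rfl, by simp⟩
  | cons x xs ih =>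
    intro a hlt hp
    have hp' := List.pairwise_cons.mp hp
    rw [pick_min?_cons_cons]
    by_cases hk : key x < key a
    · rw [if_pos hk]
      obtain ⟨m, hm, hmem, hma, hall⟩ := ih x hp'.1 hp'.2
      refine ⟨m, hm, ?_, ?_, ?_⟩
      · rcases hmem with h | h
        · exact Or.inr (h ▸ List.mem_cons_self)
        · exact Or.inr (List.mem_cons_of_mem _ h)
      · rcases hma with h | h
        · exact Or.inl (lt_trans h hk)
        · exact Or.inl (h ▸ hk)
      · intro y hy
        rcases List.mem_cons.mp hy with rfl | hy'
        · rcases hma with h | h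
          · exact Or.inl h
          · exact Or.inr ⟨by rw [h], le_of_eq h⟩
        · exact hall y hy'
    · rw [if_neg hk]
      have hax : a < x := hlt x List.mem_cons_self
      obtain ⟨m, hm, hmem, hma, hall⟩ := ih a
        (fun y hy => lt_trans hax (hp'.1 y hy)) hp'.2
      have hka : key a ≤ key x := not_lt.mp hk
      refine ⟨m, hm, ?_, hma, ?_⟩
      · rcases hmem with h | h
        · exact Or.inl h
        · exact Or.inr (List.mem_cons_of_mem _ h)
      · intro y hy
        rcases List.mem_cons.mp hy with rfl | hy'
        · rcases hma with h | h
          · exact Or.inl (lt_of_lt_of_le h hka)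
          · rcases lt_or_eq_of_le hka with h2 | h2
            · exact Or.inl (by rw [h]; exact h2)
            · exact Or.inr ⟨by rw [h]; exact h2, by rw [h]; exact le_of_lt hax⟩
        · exact hall y hy'

-- Python's min (first minimal) on a strictly ascending list returns the unique element that is
-- minimal in key and smallest among equal-key elements.
lemma pick_min?_eq (s : List Int) (hs : s.Pairwise (· < ·)) (t m0 : Int)
    (hm0 : m0 ∈ s)
    (hmin : ∀ y ∈ s, |m0 - t| ≤ |y - t| ∧ (|m0 - t| = |y - t| → m0 ≤ y)) :
    PySem.List.min? s (fun x => |x - t|) = some m0 := by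
  cases s with
  | nil => exact absurd hm0 (by simp)
  | cons x xs =>
    have hp := List.pairwise_cons.mp hs
    obtain ⟨m, hm, hmem, hma, hall⟩ := pick_min_aux (fun x => |x - t|) xs x hp.1 hp.2
    have hmmem : m ∈ x :: xs := by
      rcases hmem with h | h
      · exact h ▸ List.mem_cons_self
      · exact List.mem_cons_of_mem _ h
    have hmprop : ∀ y ∈ x :: xs, |m - t| ≤ |y - t| ∧ (|m - t| = |y - t| → m ≤ y) := by
      intro y hy
      rcases List.mem_cons.mp hy with rfl | hy'
      · rcases hma with h | h
        · exact ⟨le_of_lt h, fun he => absurd he (ne_of_lt h)⟩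
        · exact ⟨le_of_eq (by rw [h]), fun _ => le_of_eq h⟩
      · rcases hall y hy' with h | h
        · exact ⟨le_of_lt h, fun he => absurd he (ne_of_lt h)⟩
        · exact ⟨le_of_eq h.1, fun _ => h.2⟩
    have h1 := hmin m hmmem
    have h2 := hmprop m0 hm0
    have heq : |m - t| = |m0 - t| := le_antisymm h2.1 h1.1
    rw [hm, le_antisymm (h2.2 heq) (h1.2 heq.symm)]

-- |a - t| vs |b - t| comparisons, abs removed, in the four configurations the proof meets.
lemma pick_abs_helper (a b t : Int)
    (h : (t ≤ a ∧ a ≤ b) ∨ (b ≤ a ∧ a ≤ t) ∨ (a ≤ t ∧ t ≤ b ∧ t - a ≤ b - t) ∨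
         (b ≤ t ∧ t ≤ a ∧ a - t < t - b)) :
    |a - t| ≤ |b - t| ∧ (|a - t| = |b - t| → a ≤ b) := by
  rcases h with ⟨h1, h2⟩ | ⟨h1, h2⟩ | ⟨h1, h2, h3⟩ | ⟨h1, h2, h3⟩
  · rw [abs_of_nonneg (by omega : (0:Int) ≤ a - t), abs_of_nonneg (by omega : (0:Int) ≤ b - t)]
    exact ⟨by omega, fun _ => by omega⟩
  · rw [abs_of_nonpos (by omega : a - t ≤ 0), abs_of_nonpos (by omega : b - t ≤ 0)]
    exact ⟨by omega, fun _ => by omega⟩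
  · rw [abs_of_nonpos (by omega : a - t ≤ 0), abs_of_nonneg (by omega : (0:Int) ≤ b - t)]
    exact ⟨by omega, fun _ => by omega⟩
  · rw [abs_of_nonneg (by omega : (0:Int) ≤ a - t), abs_of_nonpos (by omega : b - t ≤ 0)]
    exact ⟨by omega, fun he => by omega⟩

-- The element B's bisect branch selects is exactly what A's min-by-abs returns.
lemma pick_closest_eq (s : List Int) (hs : s.Pairwise (· < ·)) (hne : s ≠ []) (t : Int) :
    PySem.List.min? s (fun x => |x - t|) = some (
      if PySem.List.bisectLeft s t = 0 then PySem.List.pyGetD s 0 0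
      else if PySem.List.bisectLeft s t = s.length then PySem.List.pyGetD s (-1) 0
      else if t - PySem.List.pyGetD s ((PySem.List.bisectLeft s t : Int) - 1) 0 ≤
              PySem.List.pyGetD s (PySem.List.bisectLeft s t : Int) 0 - t
        then PySem.List.pyGetD s ((PySem.List.bisectLeft s t : Int) - 1) 0
        else PySem.List.pyGetD s (PySem.List.bisectLeft s t : Int) 0) := by
  have hle : s.Pairwise (· ≤ ·) := hs.imp (fun h => le_of_lt h)
  obtain ⟨hib, hblt, hbge⟩ := PySem.List.bisectLeft_spec s t hle
  have hmono := List.pairwise_iff_getElem.mp hs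
  have hn : 0 < s.length := List.length_pos_iff.mpr hne
  have hmono' : ∀ j k (hj : j < s.length) (hk : k < s.length), j ≤ k → s[j] ≤ s[k] := by
    intro j k hj hk hjk
    rcases Nat.lt_or_ge j k with h | h
    · exact le_of_lt (hmono j k hj hk h)
    · have hh : j = k := le_antisymm hjk h
      subst hh; exact le_refl _
  split_ifs with h1 h2 h3
  · -- bisectLeft = 0 : everything is ≥ t, pick the first element
    have e0 : PySem.List.pyGetD s (0 : Int) 0 = s[0] := by
      rw [PySem.List.pyGetD_zero, List.getD_eq_getElem s 0 hn]
    rw [e0]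
    refine pick_min?_eq s hs t _ (List.getElem_mem hn) ?_
    intro y hy
    obtain ⟨j, hj, rfl⟩ := List.mem_iff_getElem.mp hy
    have f1 : t ≤ s[0] := hbge 0 hn (by omega)
    have f2 : s[0] ≤ s[j] := hmono' 0 j hn hj (Nat.zero_le j)
    exact pick_abs_helper _ _ _ (Or.inl ⟨f1, f2⟩)
  · -- bisectLeft = length : everything is < t, pick the last element
    have eL : PySem.List.pyGetD s (-1) 0 = s[s.length - 1] := by
      rw [PySem.List.pyGetD_neg_one s 0 hne, List.getLast_eq_getElem]
    rw [eL]
    refine pick_min?_eq s hs t _ (List.getElem_mem (by omega)) ?_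
    intro y hy
    obtain ⟨j, hj, rfl⟩ := List.mem_iff_getElem.mp hy
    have f1 : s[s.length - 1] < t := hblt (s.length - 1) (by omega) (by omega)
    have f2 : s[j] ≤ s[s.length - 1] := hmono' j (s.length - 1) hj (by omega) (by omega)
    exact pick_abs_helper _ _ _ (Or.inr (Or.inl ⟨f2, le_of_lt f1⟩))
  · -- interior, left neighbour wins the tie-break
    have hi1 : 0 < PySem.List.bisectLeft s t := Nat.pos_of_ne_zero h1
    have hiL : PySem.List.bisectLeft s t < s.length := lt_of_le_of_ne hib h2
    have ec : ((PySem.List.bisectLeft s t : Int) - 1) = ((PySem.List.bisectLeft s t - 1 : Nat) : Int) := by omega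
    have eA : PySem.List.pyGetD s ((PySem.List.bisectLeft s t : Int) - 1) 0 =
        s[PySem.List.bisectLeft s t - 1] := by
      rw [ec, PySem.List.pyGetD_natCast, List.getD_eq_getElem s 0 (by omega)]
    have eB : PySem.List.pyGetD s (PySem.List.bisectLeft s t : Int) 0 =
        s[PySem.List.bisectLeft s t] := by
      rw [PySem.List.pyGetD_natCast, List.getD_eq_getElem s 0 hiL]
    rw [eA, eB] at h3
    rw [eA]
    refine pick_min?_eq s hs t _ (List.getElem_mem (by omega)) ?_
    intro y hy
    obtain ⟨j, hj, rfl⟩ := List.mem_iff_getElem.mp hy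
    have fA : s[PySem.List.bisectLeft s t - 1] < t := hblt _ (by omega) (by omega)
    rcases Nat.lt_or_ge j (PySem.List.bisectLeft s t) with hcase | hcase
    · have f2 : s[j] ≤ s[PySem.List.bisectLeft s t - 1] := hmono' j _ hj (by omega) (by omega)
      exact pick_abs_helper _ _ _ (Or.inr (Or.inl ⟨f2, le_of_lt fA⟩))
    · have f2 : t ≤ s[j] := hbge j hj hcase
      have f3 : s[PySem.List.bisectLeft s t] ≤ s[j] := hmono' _ j hiL hj hcase
      refine pick_abs_helper _ _ _ (Or.inr (Or.inr (Or.inl ⟨le_of_lt fA, f2, by omega⟩)))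
  · -- interior, right neighbour strictly closer
    have hi1 : 0 < PySem.List.bisectLeft s t := Nat.pos_of_ne_zero h1
    have hiL : PySem.List.bisectLeft s t < s.length := lt_of_le_of_ne hib h2
    have ec : ((PySem.List.bisectLeft s t : Int) - 1) = ((PySem.List.bisectLeft s t - 1 : Nat) : Int) := by omega
    have eA : PySem.List.pyGetD s ((PySem.List.bisectLeft s t : Int) - 1) 0 =
        s[PySem.List.bisectLeft s t - 1] := by
      rw [ec, PySem.List.pyGetD_natCast, List.getD_eq_getElem s 0 (by omega)]
    have eB : PySem.List.pyGetD s (PySem.List.bisectLeft s t : Int) 0 =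
        s[PySem.List.bisectLeft s t] := by
      rw [PySem.List.pyGetD_natCast, List.getD_eq_getElem s 0 hiL]
    rw [eA, eB] at h3
    rw [eB]
    refine pick_min?_eq s hs t _ (List.getElem_mem hiL) ?_
    intro y hy
    obtain ⟨j, hj, rfl⟩ := List.mem_iff_getElem.mp hy
    have fA : s[PySem.List.bisectLeft s t - 1] < t := hblt _ (by omega) (by omega)
    have fB : t ≤ s[PySem.List.bisectLeft s t] := hbge _ hiL (le_refl _)
    rcases Nat.lt_or_ge j (PySem.List.bisectLeft s t) with hcase | hcase
    · have f2 : s[j] ≤ s[PySem.List.bisectLeft s t - 1] := hmono' j _ hj (by omega) (by omega)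
      refine pick_abs_helper _ _ _ (Or.inr (Or.inr (Or.inr ⟨by omega, fB, by omega⟩)))
    · have f3 : s[PySem.List.bisectLeft s t] ≤ s[j] := hmono' _ j hiL hj hcase
      exact pick_abs_helper _ _ _ (Or.inl ⟨fB, f3⟩)

-- ===== VERDICT (by name: the statement is the Claim_ definition above) =====
theorem pick_epochs_spec : Claim_equal_pick_epochs := by
  intro available targets _
  unfold Spec_pick_epochs pick_epochs pick_epochs_alt
  by_cases ha : available = []
  · subst ha; simp [PySem.List.sorted]
  · obtain ⟨p, hp⟩ := List.exists_mem_of_ne_nil available ha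
    have hmem : p.1 ∈ PySem.List.dedup (available.map Prod.fst) := by
      rw [PySem.List.mem_dedup]
      exact List.mem_map_of_mem hp
    have hnil : PySem.List.sorted (PySem.List.dedup (available.map Prod.fst)) (fun x => x) ≠ [] := by
      intro h
      rw [PySem.List.sorted_eq_nil_iff] at h
      rw [h] at hmem
      simp at hmem
    have hsp : (PySem.List.sorted (PySem.List.dedup (available.map Prod.fst)) (fun x => x)).Pairwise (· < ·) := by
      rw [PySem.List.dedup_eq_ofList]
      exact PySem.List.sorted_ofList_pairwise_lt _
    simp only [if_neg ha, if_neg hnil]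
    refine congrArg Prod.fst (congrFun (congrFun (congrArg List.foldl ?_) ([], PySem.Set.empty)) targets)
    funext st t
    rw [pick_closest_eq _ hsp hnil t]
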